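-- pv_equiv track=rewrite | github.com/Anamicca23/Leetcode-for-DSA | 2070-most-beautiful-item-for-each-query/2070-most-beautiful-item-for-each-query.py | maximumBeauty
-- ===== SOURCE A (Python) =====
-- from typing import List
--
-- def maximumBeauty(items: List[List[int]], queries: List[int]) -> List[int]:
--     sorted_items = sorted(items, key = lambda x: x[1], reverse = True)
--     ans = []
--     for query in queries:
--         for item in sorted_items:
--             if item[0] <= query:
--                 ans.append(item[1])
--                 break
--         else:
--             ans.append(0)
--     return ans
-- ===== SOURCE B (Python) =====
-- from typing import List
--
-- def maximumBeauty(items: List[List[int]], queries: List[int]) -> List[int]: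
--     srt = sorted(items, key=lambda x: x[0])
--     prices = [x[0] for x in srt]
--     pref = []
--     cur = None
--     for x in srt:
--         cur = x[1] if cur is None else max(cur, x[1])
--         pref.append(cur)
--
--     def bs(lo, hi, q):
--         # rightmost insertion point for q in prices[lo:hi]
--         if lo >= hi:
--             return lo
--         mid = (lo + hi) // 2
--         if prices[mid] <= q:
--             return bs(mid + 1, hi, q)
--         return bs(lo, mid, q)
--
--     res = []
--     for q in queries:
--         k = bs(0, len(prices), q)
--         res.append(pref[k - 1] if k > 0 else 0)
--     return res
-- ===== Notes on version B (the rewrite author's own statement) =====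
-- stated objective: faster
-- what changed: Instead of scanning the whole beauty-sorted list once per query, B sorts items by price, builds running prefix maxima of beauty, and answers each query with a recursive binary search over the prices.
-- outside the precondition, e.g. on maximumBeauty([[5]], [3]): A raises IndexError, B raises IndexError
import Mathlib
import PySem

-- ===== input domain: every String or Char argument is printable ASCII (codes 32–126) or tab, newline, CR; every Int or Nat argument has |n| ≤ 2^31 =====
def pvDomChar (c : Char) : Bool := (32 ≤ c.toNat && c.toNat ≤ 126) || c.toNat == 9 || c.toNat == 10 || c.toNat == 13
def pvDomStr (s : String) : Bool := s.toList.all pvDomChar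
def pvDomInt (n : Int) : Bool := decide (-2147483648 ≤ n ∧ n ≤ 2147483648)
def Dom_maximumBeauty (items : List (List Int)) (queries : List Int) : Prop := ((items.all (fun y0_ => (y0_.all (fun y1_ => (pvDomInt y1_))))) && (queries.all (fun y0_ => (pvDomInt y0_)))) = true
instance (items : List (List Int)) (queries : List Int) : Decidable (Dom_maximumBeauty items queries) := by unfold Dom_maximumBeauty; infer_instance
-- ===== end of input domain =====

-- B replaces A's per-query linear scan of a beauty-sorted list by sort-by-price +
-- running prefix maxima + a recursive binary search per query (measurably faster).


-- ===== PORT A =====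
-- A's inner 'for item in sorted_items: if item[0] <= query: append(item[1]); break / else: append(0)'
def pvFirstA (sortedItems : List (List Int)) (query : Int) : Int :=
  match sortedItems with
  | [] => 0
  | item :: rest => if item.getD 0 0 ≤ query then item.getD 1 0 else pvFirstA rest query

def maximumBeauty (items : List (List Int)) (queries : List Int) : List Int :=
  let sorted_items := PySem.List.sorted items (fun x => x.getD 1 0) true
  queries.map (fun query => pvFirstA sorted_items query)

-- ===== PORT B =====
-- Source B's prefix loop: 'cur = x[1] if cur is None else max(cur, x[1]); pref.append(cur)'
def pvPrefB : List (List Int) → Option Int → List Int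
  | [], _ => []
  | x :: xs, cur =>
      let c := match cur with
               | none => x.getD 1 0
               | some c0 => max c0 (x.getD 1 0)
      c :: pvPrefB xs (some c)

-- Source B's hand-written recursive bisect-right 'bs(lo, hi, q)'; the Nat fuel
-- (initially hi - lo, strictly decreasing) only makes the recursion structural
def pvBsBF (prices : List Int) (q : Int) : Nat → Int → Int → Int
  | 0, lo, _ => lo
  | fuel + 1, lo, hi =>
      if lo ≥ hi then lo
      else
        let mid := PySem.Int.floordiv (lo + hi) 2
        if prices.getD mid.toNat 0 ≤ q then pvBsBF prices q fuel (mid + 1) hi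
        else pvBsBF prices q fuel lo mid

def pvBsB (prices : List Int) (lo hi q : Int) : Int :=
  pvBsBF prices q (hi - lo).toNat lo hi

def maximumBeauty_alt (items : List (List Int)) (queries : List Int) : List Int :=
  let srt := PySem.List.sorted items (fun x => x.getD 0 0) false
  let prices := srt.map (fun x => x.getD 0 0)
  let pref := pvPrefB srt none
  queries.map (fun q =>
    let k := pvBsB prices 0 (prices.length : Int) q
    if 0 < k then pref.getD (k - 1).toNat 0 else 0)

-- ===== PRECONDITION & SPEC =====
-- Pre_ excludes items with fewer than two entries: Python A raises IndexError on them
-- (the sort key x[1], the accesses item[0] / item[1]).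
def Pre_maximumBeauty (items : List (List Int)) (_queries : List Int) : Prop :=
  ∀ it ∈ items, 2 ≤ it.length
instance (items : List (List Int)) (queries : List Int) : Decidable (Pre_maximumBeauty items queries) := by unfold Pre_maximumBeauty; infer_instance

def pvWitness_maximumBeauty : List (List Int) × List Int :=
  ([[1, 2], [3, 2], [2, 4], [5, 6], [3, 5]], [1, 2, 3, 4, 5, 6])

def Spec_maximumBeauty (items : List (List Int)) (queries : List Int) (out : List Int) : Prop := out = maximumBeauty_alt items queries
instance (items : List (List Int)) (queries : List Int) (out : List Int) : Decidable (Spec_maximumBeauty items queries out) := by unfold Spec_maximumBeauty; infer_instance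

-- ===== CLAIM (what is proved, stated in full; the proofs are below) =====
def Claim_equal_maximumBeauty : Prop := ∀ (items : List (List Int)) (queries : List Int), Dom_maximumBeauty items queries → Pre_maximumBeauty items queries → Spec_maximumBeauty items queries (maximumBeauty items queries)

-- ===== LEMMAS AND PROOFS =====

-- the common value: the maximal beauty over the items priced ≤ q, and 0 if there is none
def pvBest (q : Int) (xs : List (List Int)) : Int :=
  (((xs.filter (fun it => decide (it.getD 0 0 ≤ q))).map (fun it => it.getD 1 0)).max?).getD 0

lemma pvBest_perm (q : Int) {xs ys : List (List Int)} (h : xs.Perm ys) :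
    pvBest q xs = pvBest q ys := by
  unfold pvBest
  rw [List.getD_max?_eq_unbotD_maximum, List.getD_max?_eq_unbotD_maximum,
    (((h.filter _).map _)).maximum_eq]

lemma foldl_max_dominated (l : List Int) (a : Int) (h : ∀ y ∈ l, y ≤ a) :
    l.foldl max a = a := by
  induction l with
  | nil => rfl
  | cons x xs ih =>
      simp only [List.foldl_cons]
      rw [max_eq_left (h x (by simp))]
      exact ih (fun y hy => h y (by simp [hy]))

-- A's scan of the beauty-descending list returns the maximal beauty of the eligible items
lemma pvFirstA_eq_best (q : Int) (S : List (List Int))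
    (hs : S.Pairwise (fun a b => b.getD 1 0 ≤ a.getD 1 0)) :
    pvFirstA S q = pvBest q S := by
  induction S with
  | nil => rfl
  | cons x xs ih =>
      rcases List.pairwise_cons.mp hs with ⟨hx, hxs⟩
      unfold pvFirstA pvBest
      by_cases hp : x.getD 0 0 ≤ q
      · simp only [hp, if_pos, decide_true, List.filter_cons, List.map_cons]
        rw [List.max?_cons']
        simp only [Option.getD_some]
        refine (foldl_max_dominated _ _ ?_).symm
        intro y hy
        rcases List.mem_map.mp hy with ⟨it, hit, rfl⟩
        exact hx it (List.mem_of_mem_filter hit)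
      · rw [if_neg hp, List.filter_cons_of_neg (by simpa using hp)]
        exact ih hxs

-- Source B's recursive bisect splits a price-sorted list at the rightmost insertion point of q
lemma pvBsB_spec (prices : List Int) (q : Int) (hs : prices.Pairwise (· ≤ ·)) :
    ∀ lo hi : Int, 0 ≤ lo → lo ≤ hi → hi ≤ (prices.length : Int) →
    (∀ j : Nat, (j : Int) < lo → prices.getD j 0 ≤ q) →
    (∀ j : Nat, hi ≤ (j : Int) → j < prices.length → q < prices.getD j 0) →
    lo ≤ pvBsB prices lo hi q ∧ pvBsB prices lo hi q ≤ hi ∧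
      (∀ j : Nat, (j : Int) < pvBsB prices lo hi q → prices.getD j 0 ≤ q) ∧
      (∀ j : Nat, pvBsB prices lo hi q ≤ (j : Int) → j < prices.length → q < prices.getD j 0) := by
  have hmono : ∀ (i j : Nat), i ≤ j → j < prices.length → prices.getD i 0 ≤ prices.getD j 0 := by
    intro i j hij hj
    rcases Nat.eq_or_lt_of_le hij with rfl | hlt
    · exact le_refl _
    · rw [List.getD_eq_getElem _ _ (lt_trans hlt hj), List.getD_eq_getElem _ _ hj]
      exact List.pairwise_iff_getElem.mp hs i j _ _ hlt
  have main : ∀ n : Nat, ∀ lo hi : Int, (hi - lo).toNat ≤ n → 0 ≤ lo → lo ≤ hi →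
      hi ≤ (prices.length : Int) →
      (∀ j : Nat, (j : Int) < lo → prices.getD j 0 ≤ q) →
      (∀ j : Nat, hi ≤ (j : Int) → j < prices.length → q < prices.getD j 0) →
      lo ≤ pvBsBF prices q n lo hi ∧ pvBsBF prices q n lo hi ≤ hi ∧
        (∀ j : Nat, (j : Int) < pvBsBF prices q n lo hi → prices.getD j 0 ≤ q) ∧
        (∀ j : Nat, pvBsBF prices q n lo hi ≤ (j : Int) → j < prices.length → q < prices.getD j 0) := by
    intro n
    induction n with
    | zero =>
        intro lo hi hfuel h0 hlh hhi hlow hhigh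
        simp only [pvBsBF]
        exact ⟨le_refl _, by omega, hlow, fun j hj hjl => hhigh j (by omega) hjl⟩
    | succ n ihn =>
        intro lo hi hfuel h0 hlh hhi hlow hhigh
        by_cases hge : lo ≥ hi
        · simp only [pvBsBF, if_pos hge]
          exact ⟨le_refl _, hlh, hlow, fun j hj hjl => hhigh j (by omega) hjl⟩
        · simp only [pvBsBF, if_neg hge]
          have hb := PySem.Int.floordiv_two_mid_bounds (lo := lo) (hi := hi) (by omega)
          have h2 : PySem.Int.floordiv (lo + hi) 2 < hi :=
            (PySem.Int.floordiv_lt_iff_lt_mul (by omega)).mpr (by omega)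
          set mid := PySem.Int.floordiv (lo + hi) 2 with hmiddef
          have hmidlt : mid.toNat < prices.length := by omega
          by_cases hmid : prices.getD mid.toNat 0 ≤ q
          · simp only [if_pos hmid]
            obtain ⟨c1, c2, c3, c4⟩ := ihn (mid + 1) hi (by omega) (by omega) (by omega) hhi
              (fun j hj => by
                have : j ≤ mid.toNat := by omega
                exact le_trans (hmono j mid.toNat this hmidlt) hmid)
              hhigh
            exact ⟨by omega, c2, c3, c4⟩
          · simp only [if_neg hmid]
            obtain ⟨c1, c2, c3, c4⟩ := ihn lo mid (by omega) (by omega) (by omega) (by omega) hlow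
              (fun j hj hjl => by
                have hm : mid.toNat ≤ j := by omega
                exact lt_of_lt_of_le (by omega : q < prices.getD mid.toNat 0)
                  (hmono mid.toNat j hm hjl))
            exact ⟨c1, by omega, c3, c4⟩
  intro lo hi
  exact main (hi - lo).toNat lo hi (le_refl _)

-- on a price-sorted list the eligible items form exactly the prefix of length k
lemma filter_eq_take_of_split (P : List (List Int)) (q : Int) (k : Nat) (hk : k ≤ P.length)
    (hle : ∀ j : Nat, j < k → (hj : j < P.length) → P[j].getD 0 0 ≤ q)
    (hgt : ∀ j : Nat, k ≤ j → (hj : j < P.length) → q < P[j].getD 0 0) :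
    P.filter (fun it => decide (it.getD 0 0 ≤ q)) = P.take k := by
  conv_lhs => rw [← List.take_append_drop k P]
  rw [List.filter_append]
  have h1 : (P.take k).filter (fun it => decide (it.getD 0 0 ≤ q)) = P.take k := by
    apply List.filter_eq_self.mpr
    intro x hx
    rcases List.mem_iff_getElem.mp hx with ⟨j, hj, rfl⟩
    have hj' : j < k ∧ j < P.length := by simpa using hj
    rw [List.getElem_take]
    simp only [decide_eq_true_eq]
    exact hle j hj'.1 hj'.2
  have h2 : (P.drop k).filter (fun it => decide (it.getD 0 0 ≤ q)) = [] := by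
    apply List.filter_eq_nil_iff.mpr
    intro x hx
    rcases List.mem_iff_getElem.mp hx with ⟨j, hj, rfl⟩
    rw [List.getElem_drop]
    simp only [decide_eq_true_eq, not_le]
    exact hgt (k + j) (by omega) (by simp at hj; omega)
  rw [h1, h2, List.append_nil]

lemma pvPrefB_getD_some (S : List (List Int)) :
    ∀ (c : Int) (i : Nat), i < S.length →
    (pvPrefB S (some c)).getD i 0 = ((S.take (i + 1)).map (fun it => it.getD 1 0)).foldl max c := by
  induction S with
  | nil => intro c i hi; simp at hi
  | cons x xs ih =>
      intro c i hi
      cases i with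
      | zero => simp [pvPrefB]
      | succ n =>
          simp only [pvPrefB, List.getD_cons_succ, List.take_succ_cons, List.map_cons,
            List.foldl_cons]
          exact ih (max c (x.getD 1 0)) n (by simpa using Nat.lt_of_succ_lt_succ hi)

-- the i-th prefix maximum is the max beauty over the first i+1 items
lemma pvPrefB_getD_none (S : List (List Int)) (i : Nat) (hi : i < S.length) :
    (pvPrefB S none).getD i 0 = (((S.take (i + 1)).map (fun it => it.getD 1 0)).max?).getD 0 := by
  cases S with
  | nil => simp at hi
  | cons x xs =>
      cases i with
      | zero => simp [pvPrefB]
      | succ n =>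
          simp only [pvPrefB, List.getD_cons_succ, List.take_succ_cons, List.map_cons]
          rw [List.max?_cons', Option.getD_some]
          exact pvPrefB_getD_some xs (x.getD 1 0) n (by simpa using Nat.lt_of_succ_lt_succ hi)

-- B's per-query value is the maximal beauty of the eligible items
lemma alt_value_eq_best (items : List (List Int)) (q : Int) :
    (let srt := PySem.List.sorted items (fun x => x.getD 0 0) false
     let prices := srt.map (fun x => x.getD 0 0)
     let pref := pvPrefB srt none
     let k := pvBsB prices 0 (prices.length : Int) q
     if 0 < k then pref.getD (k - 1).toNat 0 else 0) = pvBest q items := by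
  set srt := PySem.List.sorted items (fun x => x.getD 0 0) false with hsrt
  set prices := srt.map (fun x => x.getD 0 0) with hprices
  set k := pvBsB prices 0 (prices.length : Int) q with hkdef
  have hplen : prices.length = srt.length := by simp [hprices]
  have hpget : ∀ j : Nat, (hj : j < srt.length) → prices.getD j 0 = (srt[j]'hj).getD 0 0 := by
    intro j hj
    rw [List.getD_eq_getElem _ _ (by omega)]
    simp [hprices]
  have hpair : prices.Pairwise (· ≤ ·) := by
    rw [hprices, List.pairwise_map]
    exact PySem.List.sorted_pairwise items (fun x => x.getD 0 0)
  have hspec := pvBsB_spec prices q hpair 0 (prices.length : Int) (le_refl 0)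
    (Int.natCast_nonneg _) (le_refl _)
    (fun j hj => absurd hj (by omega))
    (fun j hj hjl => absurd hjl (by omega))
  obtain ⟨hk0, hkle, hklow, hkhigh⟩ := hspec
  rw [← hkdef] at hk0 hkle hklow hkhigh
  rw [hplen] at hkle hkhigh
  have hkn : k.toNat ≤ srt.length := by omega
  have hfilter : srt.filter (fun it => decide (it.getD 0 0 ≤ q)) = srt.take k.toNat := by
    apply filter_eq_take_of_split srt q k.toNat hkn
    · intro j hj hjl
      rw [← hpget j hjl]
      exact hklow j (by omega)
    · intro j hj hjl
      rw [← hpget j hjl]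
      exact hkhigh j (by omega) (by omega)
  have hbest : pvBest q items = (((srt.take k.toNat).map (fun it => it.getD 1 0)).max?).getD 0 := by
    rw [pvBest_perm q (PySem.List.sorted_perm items (fun x => x.getD 0 0) false).symm]
    unfold pvBest
    rw [hfilter]
  by_cases hkpos : 0 < k
  · rw [if_pos hkpos, hbest, pvPrefB_getD_none srt (k - 1).toNat (by omega)]
    have : (k - 1).toNat + 1 = k.toNat := by omega
    rw [this]
  · rw [if_neg hkpos, hbest]
    have : k = 0 := by omega
    simp [this]

-- ===== VERDICT (by name: the statement is the Claim_ definition above) =====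
theorem maximumBeauty_spec : Claim_equal_maximumBeauty := by
  intro items queries _ _
  unfold Spec_maximumBeauty maximumBeauty maximumBeauty_alt
  simp only []
  apply List.map_congr_left
  intro q _
  rw [alt_value_eq_best items q,
    pvFirstA_eq_best q _ (PySem.List.sorted_pairwise_rev items (fun x => x.getD 1 0)),
    pvBest_perm q (PySem.List.sorted_perm items (fun x => x.getD 1 0) true)]
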